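-- pv_equiv track=rewrite | github.com/AgoraIO/agora_doc_source | update-comment/api_comment_updater/src/utils/text_utils.py | _find_line_break_point
-- ===== SOURCE A (Python) =====
-- def _find_line_break_point(text: str, max_width: int) -> int:
--     """
--     在指定宽度内找到最佳的断行点
--
--     Args:
--         text: 文本
--         max_width: 最大宽度
--
--     Returns:
--         int: 断行点位置
--     """
--     if len(text) <= max_width:
--         return len(text)
--
--     # 在最大宽度内寻找最后一个空格
--     for i in range(max_width, 0, -1):
--         if text[i] == ' ':
--             return i
--
--     # 如果没有空格，寻找标点符号
--     for i in range(max_width, 0, -1):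
--         if text[i] in '.,;:!?':
--             return i + 1
--
--     # 如果没有标点符号，寻找连字符
--     for i in range(max_width, 0, -1):
--         if text[i] == '-':
--             return i + 1
--
--     # 如果都没有找到，返回0表示无法在此处断行
--     return 0
-- ===== SOURCE B (Python) =====
-- def _find_line_break_point(text: str, max_width: int) -> int:
--     # One forward scan recording the rightmost space / punctuation / hyphen
--     # among indices 1..max_width, then apply the original priority.
--     if len(text) <= max_width:
--         return len(text)
--     last_space = last_punct = last_hyphen = -1
--     for i in range(1, max_width + 1):
--         c = text[i]
--         if c == ' ':
--             last_space = i
--         if c in '.,;:!?':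
--             last_punct = i
--         if c == '-':
--             last_hyphen = i
--     if last_space != -1:
--         return last_space
--     if last_punct != -1:
--         return last_punct + 1
--     if last_hyphen != -1:
--         return last_hyphen + 1
--     return 0
-- ===== Notes on version B (the rewrite author's own statement) =====
-- stated objective: simpler
-- what changed: Replaces A's three separate backward scans (space, then punctuation, then hyphen) by one forward scan that records the rightmost index of each class, applying the same priority afterwards.
import Mathlib
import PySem

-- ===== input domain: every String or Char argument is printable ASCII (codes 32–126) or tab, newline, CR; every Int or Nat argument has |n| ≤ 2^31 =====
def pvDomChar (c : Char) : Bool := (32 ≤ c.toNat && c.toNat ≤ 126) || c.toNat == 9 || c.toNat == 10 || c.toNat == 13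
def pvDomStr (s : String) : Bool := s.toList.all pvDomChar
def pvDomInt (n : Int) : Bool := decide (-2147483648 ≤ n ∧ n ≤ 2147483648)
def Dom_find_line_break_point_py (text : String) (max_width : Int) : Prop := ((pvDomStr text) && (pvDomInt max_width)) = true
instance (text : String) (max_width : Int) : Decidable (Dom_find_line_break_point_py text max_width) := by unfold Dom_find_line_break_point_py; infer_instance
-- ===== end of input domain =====

-- B replaces A's three backward scans by one forward scan recording the rightmost
-- index of each character class, with the same priority applied afterwards (simpler).


-- ===== PORT A =====
-- A's `for i in range(max_width, 0, -1): if <cond on text[i]>: return …` loops.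
-- text[i] is ported as pyGet? with default '\x00': the index is always in range
-- whenever a loop runs (1 ≤ i ≤ max_width < len(text)), so the default is never used.
def pvLoopA (chars : List Char) (p : Char → Bool) : List Int → Option Int
  | [] => none
  | i :: rest =>
      if p ((PySem.List.pyGet? chars i).getD (Char.ofNat 0)) then some i
      else pvLoopA chars p rest

def find_line_break_point_py (text : String) (max_width : Int) : Int :=
  let chars := text.toList
  let n : Int := chars.length
  if n ≤ max_width then n
  else
    let idxs := PySem.List.pyRange max_width 0 (-1)
    match pvLoopA chars (fun c => c == ' ') idxs with
    | some i => i
    | none =>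
      match pvLoopA chars (fun c => ['.', ',', ';', ':', '!', '?'].contains c) idxs with
      | some i => i + 1
      | none =>
        match pvLoopA chars (fun c => c == '-') idxs with
        | some i => i + 1
        | none => 0

-- ===== PORT B =====
def find_line_break_point_py_alt (text : String) (max_width : Int) : Int :=
  let chars := text.toList
  let n : Int := chars.length
  if n ≤ max_width then n
  else
    let st := (PySem.List.pyRange 1 (max_width + 1) 1).foldl
      (fun (acc : Int × Int × Int) i =>
        let c := (PySem.List.pyGet? chars i).getD (Char.ofNat 0)
        ((if c == ' ' then i else acc.1),
         (if ['.', ',', ';', ':', '!', '?'].contains c then i else acc.2.1),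
         (if c == '-' then i else acc.2.2)))
      (-1, -1, -1)
    if st.1 ≠ -1 then st.1
    else if st.2.1 ≠ -1 then st.2.1 + 1
    else if st.2.2 ≠ -1 then st.2.2 + 1
    else 0

-- ===== PRECONDITION & SPEC =====
def Spec_find_line_break_point_py (text : String) (max_width : Int) (out : Int) : Prop := out = find_line_break_point_py_alt text max_width
instance (text : String) (max_width : Int) (out : Int) : Decidable (Spec_find_line_break_point_py text max_width out) := by unfold Spec_find_line_break_point_py; infer_instance

-- ===== CLAIM (what is proved, stated in full; the proofs are below) =====
def Claim_equal_find_line_break_point_py : Prop := ∀ (text : String) (max_width : Int), Dom_find_line_break_point_py text max_width → Spec_find_line_break_point_py text max_width (find_line_break_point_py text max_width)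

-- ===== LEMMAS AND PROOFS =====

-- A's backward loop is `find?` over the index list.
theorem pvLoopA_eq_find? (chars : List Char) (p : Char → Bool) (l : List Int) :
    pvLoopA chars p l = l.find? (fun i => p ((PySem.List.pyGet? chars i).getD (Char.ofNat 0))) := by
  induction l with
  | nil => rfl
  | cons x xs ih =>
      simp only [pvLoopA, List.find?_cons, ih]
      split <;> simp_all

-- "last match" fold = first match of the reversed list.
theorem foldl_last (q : Int → Bool) (l : List Int) (init : Int) :
    l.foldl (fun acc i => if q i then i else acc) init = (l.reverse.find? q).getD init := by
  induction l generalizing init with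
  | nil => rfl
  | cons x xs ih =>
      simp only [List.foldl_cons, ih, List.reverse_cons, List.find?_append]
      cases h : xs.reverse.find? q with
      | some a => simp
      | none => by_cases hq : q x <;> simp [List.find?, hq]

-- the triple fold computes the three single folds componentwise
theorem foldl_triple (q1 q2 q3 : Int → Bool) (l : List Int) (a b c : Int) :
    l.foldl (fun (acc : Int × Int × Int) i =>
        ((if q1 i then i else acc.1),
         (if q2 i then i else acc.2.1),
         (if q3 i then i else acc.2.2))) (a, b, c)
    = (l.foldl (fun acc i => if q1 i then i else acc) a,
       l.foldl (fun acc i => if q2 i then i else acc) b,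
       l.foldl (fun acc i => if q3 i then i else acc) c) := by
  induction l generalizing a b c with
  | nil => rfl
  | cons x xs ih => simp [List.foldl_cons, ih]

theorem find?_pyRange_pos (mw : Int) (q : Int → Bool) (i : Int)
    (h : (PySem.List.pyRange mw 0 (-1)).find? q = some i) : 0 < i := by
  have hm := List.mem_of_find?_eq_some h
  rw [PySem.List.mem_pyRange_neg_one] at hm
  exact hm.1

-- ===== VERDICT (by name: the statement is the Claim_ definition above) =====
theorem find_line_break_point_py_spec : Claim_equal_find_line_break_point_py := by
  intro text max_width _
  unfold Spec_find_line_break_point_py find_line_break_point_py find_line_break_point_py_alt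
  set chars := text.toList with hchars
  simp only []
  by_cases hle : (chars.length : Int) ≤ max_width
  · simp [hle]
  · simp only [hle, if_false]
    have hrev : PySem.List.pyRange max_width 0 (-1)
        = (PySem.List.pyRange 1 (max_width + 1) 1).reverse := by
      simpa using PySem.List.pyRange_neg_one_eq_reverse max_width 0
    rw [foldl_triple, foldl_last, foldl_last, foldl_last, ← hrev]
    rw [pvLoopA_eq_find?, pvLoopA_eq_find?, pvLoopA_eq_find?]
    cases h1 : (PySem.List.pyRange max_width 0 (-1)).find?
        (fun i => ((PySem.List.pyGet? chars i).getD (Char.ofNat 0)) == ' ') with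
    | some i =>
        have := find?_pyRange_pos max_width _ _ h1
        simp; omega
    | none =>
      simp only [Option.getD_none]
      cases h2 : (PySem.List.pyRange max_width 0 (-1)).find?
          (fun i => ['.', ',', ';', ':', '!', '?'].contains ((PySem.List.pyGet? chars i).getD (Char.ofNat 0))) with
      | some i =>
          have := find?_pyRange_pos max_width _ _ h2
          simp; omega
      | none =>
        simp only [Option.getD_none]
        cases h3 : (PySem.List.pyRange max_width 0 (-1)).find?
            (fun i => ((PySem.List.pyGet? chars i).getD (Char.ofNat 0)) == '-') with
        | some i =>
            have := find?_pyRange_pos max_width _ _ h3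
            simp; omega
        | none => simp
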